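-- pv_equiv track=rewrite | github.com/eddmpython/dartlab | experiments/014_business/008_chunkPrototype.py | separateTableAndText
-- ===== SOURCE A (Python) =====
-- def separateTableAndText(content: str) -> tuple[str, list[str], int]:
--     """content를 텍스트 부분과 테이블 부분으로 분리.
--
--     Returns: (textOnly, tableHeaders, tableRowCount)
--     """
--     lines = content.split("\n")
--     textLines = []
--     tableHeaders = []
--     tableRowCount = 0
--     inTable = False
--     headerCaptured = False
--
--     for line in lines:
--         stripped = line.strip()
--         if stripped.startswith("|"):
--             tableRowCount += 1
--             if not inTable:
--                 inTable = True
--                 headerCaptured = False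
--             if not headerCaptured and "---" not in stripped:
--                 cells = [c.strip() for c in stripped.split("|") if c.strip()]
--                 if cells and cells != ["---"]:
--                     tableHeaders.append(" | ".join(cells[:5]))
--                     headerCaptured = True
--         else:
--             if inTable:
--                 inTable = False
--                 headerCaptured = False
--             if stripped:
--                 textLines.append(line)
--
--     return "\n".join(textLines), tableHeaders, tableRowCount
-- ===== SOURCE B (Python) =====
-- def separateTableAndText(content: str) -> tuple[str, list[str], int]:
--     """Block-structured rewrite: split lines into maximal runs of pipe-lines vs
--     text lines, then process each block at once."""
--     lines = content.split("\n")
--     textLines = []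
--     tableHeaders = []
--     tableRowCount = 0
--     i, n = 0, len(lines)
--     while i < n:
--         if lines[i].strip().startswith("|"):
--             j = i
--             while j < n and lines[j].strip().startswith("|"):
--                 j += 1
--             block = lines[i:j]
--             tableRowCount += len(block)
--             for line in block:
--                 stripped = line.strip()
--                 if "---" in stripped:
--                     continue
--                 cells = [c.strip() for c in stripped.split("|") if c.strip()]
--                 if cells and cells != ["---"]:
--                     tableHeaders.append(" | ".join(cells[:5]))
--                     break
--             i = j
--         else:
--             if lines[i].strip():
--                 textLines.append(lines[i])
--             i += 1
--     return "\n".join(textLines), tableHeaders, tableRowCount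
-- ===== Notes on version B (the rewrite author's own statement) =====
-- stated objective: alternative
-- what changed: A's single pass with inTable/headerCaptured flag state is replaced by a block decomposition: B scans the lines as maximal runs of pipe-lines vs text lines and processes each table block at once (count its lines, scan it for its first usable header line).
import Mathlib
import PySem

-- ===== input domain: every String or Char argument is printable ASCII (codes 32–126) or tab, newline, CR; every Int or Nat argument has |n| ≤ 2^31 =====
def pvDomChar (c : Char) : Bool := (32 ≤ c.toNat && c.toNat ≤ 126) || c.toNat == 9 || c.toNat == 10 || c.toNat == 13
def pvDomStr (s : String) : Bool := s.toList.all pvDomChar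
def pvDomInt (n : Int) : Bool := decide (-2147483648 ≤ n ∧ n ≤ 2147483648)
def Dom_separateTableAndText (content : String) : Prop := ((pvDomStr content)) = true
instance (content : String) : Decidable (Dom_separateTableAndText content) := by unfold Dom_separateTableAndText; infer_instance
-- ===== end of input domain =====

-- B replaces A's one-pass flag machine (inTable/headerCaptured) by a block
-- decomposition: it splits the lines into maximal runs of pipe-lines and
-- processes each block at once (count its lines, take its first header line);
-- same cost, plainer structure ("alternative").

-- ===== PORT A =====
def pvStepA (st : List String × List String × Int × Bool × Bool) (line : String) :
    List String × List String × Int × Bool × Bool :=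
  let stripped := PySem.Str.strip line
  if PySem.Str.startswith stripped "|" then
    let tableRowCount := st.2.2.1 + 1
    -- `if not inTable: inTable = True; headerCaptured = False`
    let flags := if !st.2.2.2.1 then (true, false) else (st.2.2.2.1, st.2.2.2.2)
    if !flags.2 && !(PySem.Str.isIn "---" stripped) then
      let cells := ((((PySem.Str.split? stripped "|").getD [])).map PySem.Str.strip).filter (fun c => c ≠ "")
      if cells ≠ [] ∧ cells ≠ ["---"] then
        (st.1, st.2.1 ++ [PySem.Str.join " | " (PySem.List.slice cells none (some 5))],
         tableRowCount, flags.1, true)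
      else (st.1, st.2.1, tableRowCount, flags.1, flags.2)
    else (st.1, st.2.1, tableRowCount, flags.1, flags.2)
  else
    -- `if inTable: inTable = False; headerCaptured = False`
    let flags := if st.2.2.2.1 then (false, false) else (false, st.2.2.2.2)
    if PySem.Str.strip line ≠ "" then
      (st.1 ++ [line], st.2.1, st.2.2.1, flags.1, flags.2)
    else (st.1, st.2.1, st.2.2.1, flags.1, flags.2)

-- `s.split(sep)` with the nonempty literal separators "\n" / "|" always succeeds,
-- so `(PySem.Str.split? _ _).getD []` is exact (split? is none only for sep = "").
def separateTableAndText (content : String) : String × List String × Int :=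
  let lines := (PySem.Str.split? content "\n").getD []
  let st := lines.foldl pvStepA ([], [], 0, false, false)
  (PySem.Str.join "\n" st.1, st.2.1, st.2.2.1)

-- ===== PORT B =====
def pvIsPipe (line : String) : Bool := PySem.Str.startswith (PySem.Str.strip line) "|"

-- first header line of a pipe-line block (B's inner `for … break` loop)
def pvFirstHeader : List String → Option String
  | [] => none
  | l :: ls =>
    let stripped := PySem.Str.strip l
    if PySem.Str.isIn "---" stripped then pvFirstHeader ls
    else
      let cells := ((((PySem.Str.split? stripped "|").getD [])).map PySem.Str.strip).filter (fun c => c ≠ "")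
      if cells ≠ [] ∧ cells ≠ ["---"] then
        some (PySem.Str.join " | " (PySem.List.slice cells none (some 5)))
      else pvFirstHeader ls

def pvAltGo : List String → List String × List String × Int
  | [] => ([], [], 0)
  | l :: ls =>
    if pvIsPipe l then
      -- the maximal run of pipe-lines starting at l (B's inner `while j < n …` scan)
      let block := l :: ls.takeWhile pvIsPipe
      let r := pvAltGo (ls.dropWhile pvIsPipe)
      (r.1,
       (match pvFirstHeader block with
        | some h => h :: r.2.1
        | none => r.2.1),
       (block.length : Int) + r.2.2)
    else
      let r := pvAltGo ls
      (if PySem.Str.strip l ≠ "" then l :: r.1 else r.1, r.2.1, r.2.2)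
  termination_by ls => ls.length
  decreasing_by
    · exact Nat.lt_succ_of_le (List.length_dropWhile_le _ _)
    · simp

def separateTableAndText_alt (content : String) : String × List String × Int :=
  let lines := (PySem.Str.split? content "\n").getD []
  let r := pvAltGo lines
  (PySem.Str.join "\n" r.1, r.2.1, r.2.2)

-- ===== PRECONDITION & SPEC =====
def Spec_separateTableAndText (content : String) (out : String × List String × Int) : Prop := out = separateTableAndText_alt content
instance (content : String) (out : String × List String × Int) : Decidable (Spec_separateTableAndText content out) := by unfold Spec_separateTableAndText; infer_instance

-- ===== CLAIM (what is proved, stated in full; the proofs are below) =====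
def Claim_equal_separateTableAndText : Prop := ∀ (content : String), Dom_separateTableAndText content → Spec_separateTableAndText content (separateTableAndText content)

-- ===== LEMMAS AND PROOFS =====

-- A's fold, rephrased as structural recursion producing only the contributions
-- (texts, headers, row count) made from a given flag state.
def pvAuxA : List String → Bool → Bool → List String × List String × Int
  | [], _, _ => ([], [], 0)
  | l :: ls, inT, hc =>
    let stripped := PySem.Str.strip l
    if PySem.Str.startswith stripped "|" then
      let hc1 := if !inT then false else hc
      if !hc1 && !(PySem.Str.isIn "---" stripped) then
        let cells := ((((PySem.Str.split? stripped "|").getD [])).map PySem.Str.strip).filter (fun c => c ≠ "")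
        if cells ≠ [] ∧ cells ≠ ["---"] then
          let r := pvAuxA ls true true
          (r.1, PySem.Str.join " | " (PySem.List.slice cells none (some 5)) :: r.2.1, 1 + r.2.2)
        else
          let r := pvAuxA ls true hc1
          (r.1, r.2.1, 1 + r.2.2)
      else
        let r := pvAuxA ls true hc1
        (r.1, r.2.1, 1 + r.2.2)
    else
      let r := pvAuxA ls false (if inT then false else hc)
      (if PySem.Str.strip l ≠ "" then l :: r.1 else r.1, r.2.1, r.2.2)

-- one step of A, as the (texts, headers, count) it emits plus the next flags
def pvDelta (l : String) (inT hc : Bool) : List String × List String × Int × Bool × Bool :=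
  let stripped := PySem.Str.strip l
  if PySem.Str.startswith stripped "|" then
    let hc1 := if !inT then false else hc
    if !hc1 && !(PySem.Str.isIn "---" stripped) then
      let cells := ((((PySem.Str.split? stripped "|").getD [])).map PySem.Str.strip).filter (fun c => c ≠ "")
      if cells ≠ [] ∧ cells ≠ ["---"] then
        ([], [PySem.Str.join " | " (PySem.List.slice cells none (some 5))], 1, true, true)
      else ([], [], 1, true, hc1)
    else ([], [], 1, true, hc1)
  else
    (if PySem.Str.strip l ≠ "" then [l] else [], [], 0, false, if inT then false else hc)

theorem pvStepA_delta (ts hs : List String) (c : Int) (inT hc : Bool) (l : String) :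
    pvStepA (ts, hs, c, inT, hc) l =
      (ts ++ (pvDelta l inT hc).1, hs ++ (pvDelta l inT hc).2.1, c + (pvDelta l inT hc).2.2.1,
       (pvDelta l inT hc).2.2.2.1, (pvDelta l inT hc).2.2.2.2) := by
  unfold pvStepA pvDelta
  by_cases hT : inT <;> simp only [hT, Bool.not_true, Bool.not_false, if_true] <;> split_ifs <;> simp_all

theorem pvAuxA_cons (l : String) (ls : List String) (inT hc : Bool) :
    pvAuxA (l :: ls) inT hc =
      ((pvDelta l inT hc).1 ++ (pvAuxA ls (pvDelta l inT hc).2.2.2.1 (pvDelta l inT hc).2.2.2.2).1,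
       (pvDelta l inT hc).2.1 ++ (pvAuxA ls (pvDelta l inT hc).2.2.2.1 (pvDelta l inT hc).2.2.2.2).2.1,
       (pvDelta l inT hc).2.2.1 + (pvAuxA ls (pvDelta l inT hc).2.2.2.1 (pvDelta l inT hc).2.2.2.2).2.2) := by
  by_cases hT : inT <;>
    simp only [pvAuxA, pvDelta, hT, Bool.not_true, Bool.not_false, if_true] <;>
    split_ifs <;> simp_all

theorem pvFoldA_eq (ls : List String) : ∀ (ts hs : List String) (c : Int) (inT hc : Bool),
    ∃ inT' hc', List.foldl pvStepA (ts, hs, c, inT, hc) ls =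
      (ts ++ (pvAuxA ls inT hc).1, hs ++ (pvAuxA ls inT hc).2.1, c + (pvAuxA ls inT hc).2.2, inT', hc') := by
  induction ls with
  | nil => exact fun ts hs c inT hc => ⟨inT, hc, by simp [pvAuxA]⟩
  | cons l ls ih =>
    intro ts hs c inT hc
    obtain ⟨inT', hc', h⟩ := ih (ts ++ (pvDelta l inT hc).1) (hs ++ (pvDelta l inT hc).2.1)
      (c + (pvDelta l inT hc).2.2.1) (pvDelta l inT hc).2.2.2.1 (pvDelta l inT hc).2.2.2.2
    exact ⟨inT', hc', by
      simp only [List.foldl_cons, pvStepA_delta, h, pvAuxA_cons, List.append_assoc, add_assoc]⟩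

-- what A contributes while `inTable = True`, in block form
def pvRunForm (ls : List String) (hc : Bool) : List String × List String × Int :=
  let block := ls.takeWhile pvIsPipe
  let rest := ls.dropWhile pvIsPipe
  let r := pvAltGo rest
  (r.1,
   (match (if hc then none else pvFirstHeader block) with
    | some h => h :: r.2.1
    | none => r.2.1),
   (block.length : Int) + r.2.2)

theorem pvMain : ∀ (n : Nat) (ls : List String), ls.length ≤ n →
    (∀ hc, pvAuxA ls false hc = pvAltGo ls) ∧ (∀ hc, pvAuxA ls true hc = pvRunForm ls hc) := by
  intro n
  induction n with
  | zero =>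
    intro ls h
    have : ls = [] := List.length_eq_zero_iff.mp (Nat.le_zero.mp h)
    subst this
    exact ⟨fun hc => by simp [pvAuxA, pvAltGo],
           fun hc => by cases hc <;> simp [pvAuxA, pvRunForm, pvAltGo, pvFirstHeader]⟩
  | succ n ih =>
    intro ls h
    match ls with
    | [] =>
      exact ⟨fun hc => by simp [pvAuxA, pvAltGo],
             fun hc => by cases hc <;> simp [pvAuxA, pvRunForm, pvAltGo, pvFirstHeader]⟩
    | l :: ls' =>
      have hlen : ls'.length ≤ n := by simp only [List.length_cons] at h; omega
      obtain ⟨ihF, ihT⟩ := ih ls' hlen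
      by_cases hp' : PySem.Str.startswith (PySem.Str.strip l) "|" = true
      · have hp : pvIsPipe l = true := by unfold pvIsPipe; simpa using hp'
        by_cases hin : PySem.Str.isIn "---" (PySem.Str.strip l) = true
        · -- separator-like pipe line: contributes no header
          refine ⟨fun hc => ?_, fun hc => ?_⟩ <;> cases hc <;>
            (simp only [pvAuxA, pvAltGo, pvRunForm, pvFirstHeader]; simp_all [pvRunForm, pvFirstHeader, add_assoc]) <;> ring
        · -- pipe line that is not a separator: whether it is the block's header
          -- depends only on its cells, split alike on both sides
          refine ⟨fun hc => ?_, fun hc => ?_⟩ <;> cases hc <;>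
            (simp only [pvAuxA, pvAltGo, pvRunForm, pvFirstHeader, hp, hp',
               List.takeWhile_cons, List.dropWhile_cons, Bool.not_true, Bool.not_false,
               Bool.true_and, Bool.false_and, if_true, Bool.false_eq_true, if_false];
             try split_ifs) <;> simp_all [pvRunForm, add_assoc] <;> ring
      · -- text line
        have hp : pvIsPipe l = false := by unfold pvIsPipe; simpa using hp'
        refine ⟨fun hc => ?_, fun hc => ?_⟩ <;> cases hc <;>
          (simp only [pvAuxA, pvAltGo, pvRunForm, pvFirstHeader]; simp_all [pvRunForm, pvAltGo, pvFirstHeader])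

theorem pvAuxA_eq (ls : List String) :
    (∀ hc, pvAuxA ls false hc = pvAltGo ls) ∧ (∀ hc, pvAuxA ls true hc = pvRunForm ls hc) :=
  pvMain ls.length ls le_rfl

-- ===== VERDICT (by name: the statement is the Claim_ definition above) =====
theorem separateTableAndText_spec : Claim_equal_separateTableAndText := by
  intro content _
  unfold Spec_separateTableAndText separateTableAndText separateTableAndText_alt
  obtain ⟨inT', hc', h⟩ := pvFoldA_eq ((PySem.Str.split? content "\n").getD []) [] [] 0 false false
  simp only [h, (pvAuxA_eq _).1, List.nil_append, zero_add]
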